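-- pv_equiv track=rewrite | github.com/eliottcassidy2000/math | 04-computation/overlap_weight_analysis.py | omega_adjacency
-- ===== SOURCE A (Python) =====
-- def omega_adjacency(cycles):
--     """Build the adjacency matrix of the conflict graph Omega(T).
--     Two cycles are adjacent iff they share a vertex."""
--     n = len(cycles)
--     adj = [[0] * n for _ in range(n)]
--     for i in range(n):
--         for j in range(i+1, n):
--             if cycles[i][0] & cycles[j][0]:
--                 adj[i][j] = 1
--                 adj[j][i] = 1
--     return adj
-- ===== SOURCE B (Python) =====
-- def omega_adjacency(cycles):
--     """Build the adjacency matrix of the conflict graph Omega(T).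
--     Two cycles are adjacent iff they share a vertex.
--
--     Cycles are grouped by identical vertex mask (first element), the
--     intersection test runs once per pair of masks, and its verdict is
--     broadcast to every pair of cycle indices carrying those masks."""
--     n = len(cycles)
--     groups = {}
--     for i, c in enumerate(cycles):
--         groups.setdefault(c[0], []).append(i)
--     masks = list(groups)
--     adj = [[0] * n for _ in range(n)]
--     for a in range(len(masks)):
--         for b in range(a, len(masks)):
--             if masks[a] & masks[b]:
--                 for i in groups[masks[a]]:
--                     for j in groups[masks[b]]:
--                         if i != j:
--                             adj[i][j] = 1
--                             adj[j][i] = 1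
--     return adj
-- ===== Notes on version B (the rewrite author's own statement) =====
-- stated objective: alternative
-- what changed: Replaces A's all-pairs bitwise-AND test over cycle indices with a hash grouping of cycles by identical vertex mask: the AND test runs once per pair of distinct masks and its verdict is broadcast to all index pairs of the two groups; Pre_ excludes inputs containing an empty inner list, where B (and A for n>=2) raises IndexError on c[0].
-- outside the precondition, e.g. on omega_adjacency([()]): A returns [[0]], B raises IndexError
import Mathlib
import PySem

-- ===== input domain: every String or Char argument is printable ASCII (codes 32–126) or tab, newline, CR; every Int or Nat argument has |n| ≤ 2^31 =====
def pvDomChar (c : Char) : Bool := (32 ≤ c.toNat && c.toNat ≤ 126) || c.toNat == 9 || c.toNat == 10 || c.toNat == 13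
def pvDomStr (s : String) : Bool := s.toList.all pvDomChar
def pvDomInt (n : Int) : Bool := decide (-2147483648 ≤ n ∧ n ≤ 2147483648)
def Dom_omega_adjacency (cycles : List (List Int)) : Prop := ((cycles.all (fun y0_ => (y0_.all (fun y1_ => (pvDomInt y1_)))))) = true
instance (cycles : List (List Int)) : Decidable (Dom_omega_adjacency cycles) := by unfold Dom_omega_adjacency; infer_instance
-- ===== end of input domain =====

-- B groups the cycles by identical vertex mask and tests '&' once per pair of masks; same result, different traversal.

-- ===== PORT A =====
-- c[0] (both Pythons index the first element); Pre_ guarantees nonempty inner lists, where this is exact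
def pvHead0 (c : List Int) : Int := (PySem.List.pyGet? c 0).getD 0

-- adj[i][j] = 1
def pvSet1 (m : List (List Int)) (i j : Nat) : List (List Int) :=
  m.modify i (fun row => row.set j 1)

def omega_adjacency (cycles : List (List Int)) : List (List Int) :=
  let n := cycles.length
  let adj := List.replicate n (List.replicate n 0)
  (List.range n).foldl (fun adj i =>
    (List.range' (i+1) (n - (i+1))).foldl (fun adj j =>
      if PySem.Int.band (pvHead0 (cycles.getD i [])) (pvHead0 (cycles.getD j [])) ≠ 0 then
        pvSet1 (pvSet1 adj i j) j i
      else adj) adj) adj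

-- ===== PORT B =====
-- groups.setdefault(c[0], []).append(i): d[c[0]] = d.get(c[0], []) ++ [i]
def pvGroups (cycles : List (List Int)) : PySem.Dict Int (List Int) :=
  (PySem.List.enumerate cycles).foldl
    (fun d ic => d.modify (pvHead0 ic.2) [] (· ++ [ic.1])) PySem.Dict.empty

def omega_adjacency_alt (cycles : List (List Int)) : List (List Int) :=
  let n := cycles.length
  let groups := pvGroups cycles
  let masks := groups.keys
  let adj := List.replicate n (List.replicate n 0)
  -- the loop indices i, j are Python ints (here produced by enumerate, hence ≥ 0); .toNat is exact
  (List.range masks.length).foldl (fun adj a =>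
    (List.range' a (masks.length - a)).foldl (fun adj b =>
      if PySem.Int.band (masks.getD a 0) (masks.getD b 0) ≠ 0 then
        (groups.getD (masks.getD a 0) []).foldl (fun adj i =>
          (groups.getD (masks.getD b 0) []).foldl (fun adj j =>
            if i ≠ j then pvSet1 (pvSet1 adj i.toNat j.toNat) j.toNat i.toNat else adj) adj) adj
      else adj) adj) adj

-- ===== PRECONDITION & SPEC =====
-- Pre_ excludes inputs containing an empty inner list: B raises IndexError extracting c[0] there, and so does A at cycles[i][0] except in the degenerate single-cycle case, where its pair loop never indexes
def Pre_omega_adjacency (cycles : List (List Int)) : Prop := ∀ c ∈ cycles, c ≠ []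
instance (cycles : List (List Int)) : Decidable (Pre_omega_adjacency cycles) := by
  unfold Pre_omega_adjacency; infer_instance

def pvWitness_omega_adjacency : List (List Int) := [[3], [5, 9], [4], [-1], [0]]

def Spec_omega_adjacency (cycles : List (List Int)) (out : List (List Int)) : Prop := out = omega_adjacency_alt cycles
instance (cycles : List (List Int)) (out : List (List Int)) : Decidable (Spec_omega_adjacency cycles out) := by unfold Spec_omega_adjacency; infer_instance

-- ===== CLAIM (what is proved, stated in full; the proofs are below) =====
def Claim_equal_omega_adjacency : Prop := ∀ (cycles : List (List Int)), Dom_omega_adjacency cycles → Pre_omega_adjacency cycles → Spec_omega_adjacency cycles (omega_adjacency cycles)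

-- ===== LEMMAS AND PROOFS =====

def pvGet (m : List (List Int)) (p q : Nat) : Int := ((m[p]?).getD []).getD q 0
def pvShape (m : List (List Int)) (n : Nat) : Prop := m.length = n ∧ ∀ r ∈ m, r.length = n
def pvHd (cycles : List (List Int)) (i : Nat) : Int := pvHead0 (cycles.getD i [])

lemma pvShape_set1 {m : List (List Int)} {n x y : Nat} (h : pvShape m n) :
    pvShape (pvSet1 m x y) n := by
  obtain ⟨h1, h2⟩ := h
  refine ⟨by simp [pvSet1, h1], ?_⟩
  intro r hr
  obtain ⟨i, hi⟩ := List.mem_iff_getElem?.mp hr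
  rw [pvSet1, List.getElem?_modify] at hi
  cases hmi : m[i]? with
  | none => rw [hmi] at hi; simp at hi
  | some a =>
    have ham : a ∈ m := List.mem_of_getElem? hmi
    rw [hmi] at hi
    rw [Option.map_coe, Option.some_inj] at hi
    by_cases hxi : x = i
    · rw [if_pos hxi] at hi
      rw [← hi, List.length_set]
      exact h2 _ ham
    · rw [if_neg hxi] at hi
      rw [← hi]
      exact h2 _ ham

lemma pvGet_set1 {m : List (List Int)} {n : Nat} (h : pvShape m n) {x y : Nat}
    (hx : x < n) (hy : y < n) (p q : Nat) :
    pvGet (pvSet1 m x y) p q = if p = x ∧ q = y then 1 else pvGet m p q := by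
  obtain ⟨h1, h2⟩ := h
  unfold pvGet pvSet1
  rw [List.getElem?_modify]
  by_cases hpx : x = p
  · subst hpx
    have hxlt : x < m.length := by omega
    rw [List.getElem?_eq_getElem hxlt]
    have hrow : m[x].length = n := h2 _ (List.getElem_mem hxlt)
    rw [Option.map_coe, Option.getD_some]
    simp only [if_true]
    rw [List.getD_eq_getElem?_getD, List.getElem?_set, List.getD_eq_getElem?_getD]
    by_cases hqy : y = q
    · subst hqy
      rw [if_pos rfl, if_pos (by omega)]
      simp
    · rw [if_neg hqy, if_neg (by tauto)]
      simp
  · rw [if_neg (by intro hc; exact hpx hc.1.symm)]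
    simp [hpx]

lemma pvA_inner (cycles : List (List Int)) (n i : Nat) (hi : i < n) (p q : Nat) :
    ∀ (js : List Nat), (∀ j ∈ js, j < n) → ∀ (adj : List (List Int)), pvShape adj n →
    pvShape (js.foldl (fun adj j =>
        if PySem.Int.band (pvHead0 (cycles.getD i [])) (pvHead0 (cycles.getD j [])) ≠ 0 then
          pvSet1 (pvSet1 adj i j) j i
        else adj) adj) n ∧
    pvGet (js.foldl (fun adj j =>
        if PySem.Int.band (pvHead0 (cycles.getD i [])) (pvHead0 (cycles.getD j [])) ≠ 0 then
          pvSet1 (pvSet1 adj i j) j i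
        else adj) adj) p q =
      if ∃ j ∈ js, PySem.Int.band (pvHd cycles i) (pvHd cycles j) ≠ 0 ∧
          ((p = i ∧ q = j) ∨ (p = j ∧ q = i)) then 1 else pvGet adj p q := by
  intro js
  induction js with
  | nil => intro _ adj h; exact ⟨h, by simp⟩
  | cons j js ih =>
    intro hjs adj h
    have hj : j < n := hjs _ (by simp)
    have hjs' : ∀ x ∈ js, x < n := fun x hx => hjs _ (by simp [hx])
    simp only [List.foldl_cons]
    by_cases hc : PySem.Int.band (pvHd cycles i) (pvHd cycles j) ≠ 0
    · rw [if_pos (by exact hc)]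
      have h1 : pvShape (pvSet1 adj i j) n := pvShape_set1 h
      have h2 : pvShape (pvSet1 (pvSet1 adj i j) j i) n := pvShape_set1 h1
      obtain ⟨hS, hG⟩ := ih hjs' _ h2
      refine ⟨hS, ?_⟩
      rw [hG, pvGet_set1 h1 hj hi, pvGet_set1 h hi hj]
      by_cases hE : ∃ x ∈ js, PySem.Int.band (pvHd cycles i) (pvHd cycles x) ≠ 0 ∧
          ((p = i ∧ q = x) ∨ (p = x ∧ q = i))
      · rw [if_pos hE, if_pos (by obtain ⟨x, hx1, hx2⟩ := hE; exact ⟨x, by simp [hx1], hx2⟩)]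
      · rw [if_neg hE]
        by_cases hpm : (p = i ∧ q = j) ∨ (p = j ∧ q = i)
        · have hEx : ∃ x ∈ j :: js, PySem.Int.band (pvHd cycles i) (pvHd cycles x) ≠ 0 ∧
              ((p = i ∧ q = x) ∨ (p = x ∧ q = i)) := ⟨j, by simp, hc, hpm⟩
          rw [if_pos hEx]
          rcases hpm with hpm1 | hpm1
          · by_cases hji : p = j ∧ q = i
            · rw [if_pos hji]
            · rw [if_neg hji, if_pos hpm1]
          · rw [if_pos hpm1]
        · rw [if_neg (by tauto), if_neg (by tauto), if_neg (by
            rintro ⟨x, hx, hcx, hpx⟩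
            rcases List.mem_cons.mp hx with rfl | hx'
            · exact hpm hpx
            · exact hE ⟨x, hx', hcx, hpx⟩)]
    · rw [if_neg (by exact hc)]
      obtain ⟨hS, hG⟩ := ih hjs' _ h
      refine ⟨hS, ?_⟩
      rw [hG]
      by_cases hE : ∃ x ∈ js, PySem.Int.band (pvHd cycles i) (pvHd cycles x) ≠ 0 ∧
          ((p = i ∧ q = x) ∨ (p = x ∧ q = i))
      · have hEx : ∃ x ∈ j :: js, PySem.Int.band (pvHd cycles i) (pvHd cycles x) ≠ 0 ∧
            ((p = i ∧ q = x) ∨ (p = x ∧ q = i)) := by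
          obtain ⟨x, h1, h2⟩ := hE; exact ⟨x, by simp [h1], h2⟩
        rw [if_pos hE, if_pos hEx]
      · rw [if_neg hE, if_neg (by
          rintro ⟨x, hx, hcx, hpx⟩
          rcases List.mem_cons.mp hx with rfl | hx'
          · exact hc hcx
          · exact hE ⟨x, hx', hcx, hpx⟩)]

lemma pvA_outer (cycles : List (List Int)) (n : Nat) (p q : Nat) :
    ∀ (is : List Nat), (∀ i ∈ is, i < n) → ∀ (adj : List (List Int)), pvShape adj n →
    pvShape (is.foldl (fun adj i =>
        (List.range' (i+1) (n - (i+1))).foldl (fun adj j =>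
          if PySem.Int.band (pvHead0 (cycles.getD i [])) (pvHead0 (cycles.getD j [])) ≠ 0 then
            pvSet1 (pvSet1 adj i j) j i
          else adj) adj) adj) n ∧
    pvGet (is.foldl (fun adj i =>
        (List.range' (i+1) (n - (i+1))).foldl (fun adj j =>
          if PySem.Int.band (pvHead0 (cycles.getD i [])) (pvHead0 (cycles.getD j [])) ≠ 0 then
            pvSet1 (pvSet1 adj i j) j i
          else adj) adj) adj) p q =
      if ∃ i ∈ is, ∃ j < n, i < j ∧ PySem.Int.band (pvHd cycles i) (pvHd cycles j) ≠ 0 ∧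
          ((p = i ∧ q = j) ∨ (p = j ∧ q = i)) then 1 else pvGet adj p q := by
  intro is
  induction is with
  | nil => intro _ adj h; exact ⟨h, by simp⟩
  | cons i is ih =>
    intro his adj h
    have hi : i < n := his _ (by simp)
    have his' : ∀ x ∈ is, x < n := fun x hx => his _ (by simp [hx])
    simp only [List.foldl_cons]
    have hmem : ∀ j, j ∈ List.range' (i+1) (n - (i+1)) ↔ i + 1 ≤ j ∧ j < n := by
      intro j
      rw [List.mem_range'_1]
      omega
    obtain ⟨hS1, hG1⟩ := pvA_inner cycles n i hi p q (List.range' (i+1) (n - (i+1)))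
      (fun j hj => ((hmem j).mp hj).2) adj h
    obtain ⟨hS, hG⟩ := ih his' _ hS1
    refine ⟨hS, ?_⟩
    rw [hG, hG1]
    by_cases hE : ∃ x ∈ is, ∃ j < n, x < j ∧ PySem.Int.band (pvHd cycles x) (pvHd cycles j) ≠ 0 ∧
        ((p = x ∧ q = j) ∨ (p = j ∧ q = x))
    · rw [if_pos hE, if_pos (by obtain ⟨x, h1, h2⟩ := hE; exact ⟨x, by simp [h1], h2⟩)]
    · rw [if_neg hE]
      by_cases hEi : ∃ j ∈ List.range' (i+1) (n - (i+1)),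
          PySem.Int.band (pvHd cycles i) (pvHd cycles j) ≠ 0 ∧ ((p = i ∧ q = j) ∨ (p = j ∧ q = i))
      · have hEx : ∃ x ∈ i :: is, ∃ j < n, x < j ∧
            PySem.Int.band (pvHd cycles x) (pvHd cycles j) ≠ 0 ∧
            ((p = x ∧ q = j) ∨ (p = j ∧ q = x)) := by
          obtain ⟨j, hj1, hj2⟩ := hEi
          have := (hmem j).mp hj1
          exact ⟨i, by simp, j, this.2, by omega, hj2⟩
        rw [if_pos hEi, if_pos hEx]
      · rw [if_neg hEi, if_neg (by
          rintro ⟨x, hx, j, hjn, hxj, hcx, hpx⟩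
          rcases List.mem_cons.mp hx with rfl | hx'
          · exact hEi ⟨j, (hmem j).mpr ⟨by omega, hjn⟩, hcx, hpx⟩
          · exact hE ⟨x, hx', j, hjn, hxj, hcx, hpx⟩)]

def pvM (cycles : List (List Int)) : List (List Int) :=
  (List.range cycles.length).map (fun p => (List.range cycles.length).map (fun q =>
    if p ≠ q ∧ PySem.Int.band (pvHd cycles p) (pvHd cycles q) ≠ 0 then 1 else 0))

lemma pvGet_init (n p q : Nat) : pvGet (List.replicate n (List.replicate n (0:Int))) p q = 0 := by
  simp only [pvGet, List.getElem?_replicate, List.getD_eq_getElem?_getD]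
  split_ifs <;> simp [List.getElem?_replicate] <;> split_ifs <;> simp

lemma pvA_eq_M (cycles : List (List Int)) : omega_adjacency cycles = pvM cycles := by
  have hinit : pvShape (List.replicate cycles.length (List.replicate cycles.length (0:Int)))
      cycles.length := ⟨by simp, fun r hr => by rw [List.eq_of_mem_replicate hr]; simp⟩
  have hmain := fun p q => pvA_outer cycles cycles.length p q (List.range cycles.length)
    (fun i hi => List.mem_range.mp hi) _ hinit
  have hm' : omega_adjacency cycles = (List.range cycles.length).foldl (fun adj i =>
      (List.range' (i+1) (cycles.length - (i+1))).foldl (fun adj j =>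
        if PySem.Int.band (pvHead0 (cycles.getD i [])) (pvHead0 (cycles.getD j [])) ≠ 0 then
          pvSet1 (pvSet1 adj i j) j i
        else adj) adj)
      (List.replicate cycles.length (List.replicate cycles.length 0)) := rfl
  have hS : pvShape (omega_adjacency cycles) cycles.length := by
    rw [hm']; exact (hmain 0 0).1
  have hGet : ∀ p q, pvGet (omega_adjacency cycles) p q =
      if ∃ i ∈ List.range cycles.length, ∃ j < cycles.length, i < j ∧
          PySem.Int.band (pvHd cycles i) (pvHd cycles j) ≠ 0 ∧
          ((p = i ∧ q = j) ∨ (p = j ∧ q = i)) then 1 else 0 := by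
    intro p q
    rw [hm', (hmain p q).2, pvGet_init]
  apply List.ext_getElem
  · rw [hS.1]; simp [pvM]
  · intro p hp hp2
    have hpn : p < cycles.length := by rw [← hS.1]; exact hp
    apply List.ext_getElem
    · rw [hS.2 _ (List.getElem_mem hp)]
      simp [pvM]
    · intro q hq hq2
      have hqn : q < cycles.length := by
        rw [hS.2 _ (List.getElem_mem hp)] at hq; exact hq
      have hL : (omega_adjacency cycles)[p][q] = pvGet (omega_adjacency cycles) p q := by
        rw [pvGet, List.getElem?_eq_getElem hp, Option.getD_some, List.getD_eq_getElem?_getD,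
          List.getElem?_eq_getElem hq, Option.getD_some]
      rw [hL, hGet]
      have hR : (pvM cycles)[p][q]'hq2 =
          if p ≠ q ∧ PySem.Int.band (pvHd cycles p) (pvHd cycles q) ≠ 0 then 1 else 0 := by
        simp [pvM]
      rw [hR]
      by_cases hpq : p ≠ q ∧ PySem.Int.band (pvHd cycles p) (pvHd cycles q) ≠ 0
      · rw [if_pos hpq, if_pos ?_]
        obtain ⟨hne, hband⟩ := hpq
        rcases Nat.lt_or_ge p q with hlt | hge
        · exact ⟨p, List.mem_range.mpr hpn, q, hqn, hlt, hband, Or.inl ⟨rfl, rfl⟩⟩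
        · have hlt : q < p := by omega
          exact ⟨q, List.mem_range.mpr hqn, p, hpn, hlt,
            by rw [PySem.Int.band_comm]; exact hband, Or.inr ⟨rfl, rfl⟩⟩
      · rw [if_neg hpq, if_neg ?_]
        rintro ⟨i, _, j, _, hij, hband, hpair⟩
        apply hpq
        rcases hpair with ⟨rfl, rfl⟩ | ⟨rfl, rfl⟩
        · exact ⟨by omega, hband⟩
        · exact ⟨by omega, by rw [PySem.Int.band_comm]; exact hband⟩

-- ---- B-side lemmas ----

-- the group list for mask h, as natural indices
def pvGrpN (cycles : List (List Int)) (h : Int) : List Nat :=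
  (List.range cycles.length).filter (fun k => pvHd cycles k == h)

lemma pvEnumFilter (P : List Int → Bool) : ∀ (c : List (List Int)) (s : Int),
    ((PySem.List.enumerate c s).filter (fun ic => P ic.2)).map (·.1)
      = ((List.range c.length).filter (fun k => P (c.getD k []))).map (fun (k : Nat) => s + (k : Int)) := by
  intro c
  induction c with
  | nil => intro s; simp [PySem.List.enumerate_nil]
  | cons x c ih =>
    intro s
    rw [PySem.List.enumerate_cons, List.length_cons, List.range_succ_eq_map,
      List.filter_cons, List.filter_cons]
    simp only [List.getD_cons_zero]
    have h1 : ((fun k => P ((x :: c).getD k [])) ∘ Nat.succ) = fun k => P (c.getD k []) := by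
      funext k; simp
    by_cases hP : P x
    · rw [if_pos hP, if_pos hP, List.map_cons, List.map_cons, List.filter_map, h1, ih (s+1)]
      congr 1
      · simp
      · rw [List.map_map]
        apply List.map_congr_left
        intro k _
        simp only [Function.comp_apply, Nat.succ_eq_add_one]
        push_cast
        ring
    · rw [if_neg (by simpa using hP), if_neg (by simpa using hP), List.filter_map, h1, ih (s+1)]
      rw [List.map_map]
      apply List.map_congr_left
      intro k _
      simp only [Function.comp_apply, Nat.succ_eq_add_one]
      push_cast
      ring

lemma pvGrp_eq (cycles : List (List Int)) (h : Int) :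
    (pvGroups cycles).getD h [] = (pvGrpN cycles h).map (fun (k : Nat) => (k : Int)) := by
  have hfold : pvGroups cycles
      = ((PySem.List.enumerate cycles).map (fun ic => (pvHead0 ic.2, ic.1))).foldl
          (fun d p => d.modify p.1 [] (· ++ [p.2])) PySem.Dict.empty := by
    rw [pvGroups, List.foldl_map]
  rw [hfold, PySem.Dict.getD_foldl_modify_append, PySem.Dict.getD_empty, List.nil_append]
  have h2 : ((PySem.List.enumerate cycles).map (fun ic => (pvHead0 ic.2, ic.1))).filter
        (fun p => p.1 == h)
      = ((PySem.List.enumerate cycles).filter (fun ic => pvHead0 ic.2 == h)).map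
          (fun ic => (pvHead0 ic.2, ic.1)) := by
    rw [List.filter_map]
    rfl
  rw [h2, List.map_map]
  have h3 : ((fun p : Int × Int => p.2) ∘ fun ic : Int × List Int => (pvHead0 ic.2, ic.1))
      = fun ic : Int × List Int => ic.1 := rfl
  rw [h3]
  have := pvEnumFilter (fun c' => pvHead0 c' == h) cycles 0
  rw [show PySem.List.enumerate cycles = PySem.List.enumerate cycles 0 from rfl, this]
  rw [pvGrpN]
  simp only [pvHd]
  apply List.map_congr_left
  intro k _
  simp

lemma pvMasks_keys (cycles : List (List Int)) :
    (pvGroups cycles).keys = PySem.Set.ofList (cycles.map pvHead0) := by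
  rw [pvGroups, PySem.Dict.keys_foldl_modify_key (key := fun ic : Int × List Int => pvHead0 ic.2)]
  rw [PySem.Dict.keys_empty, PySem.Set.update_nil_left]
  congr 1
  have : (fun ic : Int × List Int => pvHead0 ic.2)
      = pvHead0 ∘ (fun ic : Int × List Int => ic.2) := rfl
  rw [this, ← List.map_map, PySem.List.map_snd_enumerate]

lemma pvMem_masks (cycles : List (List Int)) (h : Int) :
    h ∈ (pvGroups cycles).keys ↔ ∃ k < cycles.length, pvHd cycles k = h := by
  rw [pvMasks_keys, PySem.Set.mem_ofList, List.mem_map]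
  constructor
  · rintro ⟨a, ha, rfl⟩
    obtain ⟨k, hk, rfl⟩ := List.mem_iff_getElem.mp ha
    exact ⟨k, hk, by simp [pvHd, List.getD_eq_getElem?_getD, List.getElem?_eq_getElem hk]⟩
  · rintro ⟨k, hk, rfl⟩
    exact ⟨cycles[k], List.getElem_mem hk,
      by simp [pvHd, List.getD_eq_getElem?_getD, List.getElem?_eq_getElem hk]⟩

lemma pvB_j (n i : Nat) (hi : i < n) (p q : Nat) :
    ∀ (js : List Nat), (∀ j ∈ js, j < n) → ∀ (adj : List (List Int)), pvShape adj n →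
    pvShape (js.foldl (fun adj j => if i ≠ j then pvSet1 (pvSet1 adj i j) j i else adj) adj) n ∧
    pvGet (js.foldl (fun adj j => if i ≠ j then pvSet1 (pvSet1 adj i j) j i else adj) adj) p q =
      if ∃ j ∈ js, i ≠ j ∧ ((p = i ∧ q = j) ∨ (p = j ∧ q = i)) then 1 else pvGet adj p q := by
  intro js
  induction js with
  | nil => intro _ adj h; exact ⟨h, by simp⟩
  | cons j js ih =>
    intro hjs adj h
    have hj : j < n := hjs _ (by simp)
    have hjs' : ∀ x ∈ js, x < n := fun x hx => hjs _ (by simp [hx])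
    simp only [List.foldl_cons]
    by_cases hc : i ≠ j
    · rw [if_pos hc]
      have h1 : pvShape (pvSet1 adj i j) n := pvShape_set1 h
      have h2 : pvShape (pvSet1 (pvSet1 adj i j) j i) n := pvShape_set1 h1
      obtain ⟨hS, hG⟩ := ih hjs' _ h2
      refine ⟨hS, ?_⟩
      rw [hG, pvGet_set1 h1 hj hi, pvGet_set1 h hi hj]
      by_cases hE : ∃ x ∈ js, i ≠ x ∧ ((p = i ∧ q = x) ∨ (p = x ∧ q = i))
      · rw [if_pos hE, if_pos (by obtain ⟨x, hx1, hx2⟩ := hE; exact ⟨x, by simp [hx1], hx2⟩)]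
      · rw [if_neg hE]
        by_cases hpm : (p = i ∧ q = j) ∨ (p = j ∧ q = i)
        · have hEx : ∃ x ∈ j :: js, i ≠ x ∧ ((p = i ∧ q = x) ∨ (p = x ∧ q = i)) :=
            ⟨j, by simp, hc, hpm⟩
          rw [if_pos hEx]
          rcases hpm with hpm1 | hpm1
          · by_cases hji : p = j ∧ q = i
            · rw [if_pos hji]
            · rw [if_neg hji, if_pos hpm1]
          · rw [if_pos hpm1]
        · rw [if_neg (by tauto), if_neg (by tauto), if_neg (by
            rintro ⟨x, hx, hcx, hpx⟩
            rcases List.mem_cons.mp hx with rfl | hx'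
            · exact hpm hpx
            · exact hE ⟨x, hx', hcx, hpx⟩)]
    · rw [if_neg hc]
      obtain ⟨hS, hG⟩ := ih hjs' _ h
      refine ⟨hS, ?_⟩
      rw [hG]
      by_cases hE : ∃ x ∈ js, i ≠ x ∧ ((p = i ∧ q = x) ∨ (p = x ∧ q = i))
      · rw [if_pos hE, if_pos (by obtain ⟨x, h1, h2⟩ := hE; exact ⟨x, by simp [h1], h2⟩)]
      · rw [if_neg hE, if_neg (by
          rintro ⟨x, hx, hcx, hpx⟩
          rcases List.mem_cons.mp hx with rfl | hx'
          · exact hc hcx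
          · exact hE ⟨x, hx', hcx, hpx⟩)]

lemma pvB_i (n : Nat) (p q : Nat) (js : List Nat) (hjs : ∀ j ∈ js, j < n) :
    ∀ (is : List Nat), (∀ i ∈ is, i < n) → ∀ (adj : List (List Int)), pvShape adj n →
    pvShape (is.foldl (fun adj i =>
      js.foldl (fun adj j => if i ≠ j then pvSet1 (pvSet1 adj i j) j i else adj) adj) adj) n ∧
    pvGet (is.foldl (fun adj i =>
      js.foldl (fun adj j => if i ≠ j then pvSet1 (pvSet1 adj i j) j i else adj) adj) adj) p q =
      if ∃ i ∈ is, ∃ j ∈ js, i ≠ j ∧ ((p = i ∧ q = j) ∨ (p = j ∧ q = i)) then 1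
      else pvGet adj p q := by
  intro is
  induction is with
  | nil => intro _ adj h; exact ⟨h, by simp⟩
  | cons i is ih =>
    intro his adj h
    have hi : i < n := his _ (by simp)
    have his' : ∀ x ∈ is, x < n := fun x hx => his _ (by simp [hx])
    simp only [List.foldl_cons]
    obtain ⟨hS1, hG1⟩ := pvB_j n i hi p q js hjs adj h
    obtain ⟨hS, hG⟩ := ih his' _ hS1
    refine ⟨hS, ?_⟩
    rw [hG, hG1]
    by_cases hE : ∃ x ∈ is, ∃ j ∈ js, x ≠ j ∧ ((p = x ∧ q = j) ∨ (p = j ∧ q = x))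
    · rw [if_pos hE, if_pos (by obtain ⟨x, h1, h2⟩ := hE; exact ⟨x, by simp [h1], h2⟩)]
    · rw [if_neg hE]
      by_cases hEi : ∃ j ∈ js, i ≠ j ∧ ((p = i ∧ q = j) ∨ (p = j ∧ q = i))
      · rw [if_pos hEi, if_pos (by obtain ⟨j, h1, h2⟩ := hEi; exact ⟨i, by simp, j, h1, h2⟩)]
      · rw [if_neg hEi, if_neg (by
          rintro ⟨x, hx, j, hj, hcx, hpx⟩
          rcases List.mem_cons.mp hx with rfl | hx'
          · exact hEi ⟨j, hj, hcx, hpx⟩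
          · exact hE ⟨x, hx', j, hj, hcx, hpx⟩)]

lemma pvMem_grpN (cycles : List (List Int)) (h : Int) (k : Nat) :
    k ∈ pvGrpN cycles h ↔ k < cycles.length ∧ pvHd cycles k = h := by
  simp [pvGrpN, List.mem_filter]

lemma pvMasks_getD (cycles : List (List Int)) (a : Nat) (ha : a < (pvGroups cycles).keys.length) :
    (pvGroups cycles).keys.getD a 0 = (pvGroups cycles).keys[a] := by
  rw [List.getD_eq_getElem?_getD, List.getElem?_eq_getElem ha, Option.getD_some]

lemma pvB_b (n : Nat) (Ms : Nat → Int) (G : Nat → List Nat)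
    (hG : ∀ x, ∀ k ∈ G x, k < n) (a : Nat) (p q : Nat) :
    ∀ (bs : List Nat), ∀ (adj : List (List Int)), pvShape adj n →
    pvShape (bs.foldl (fun adj b => if PySem.Int.band (Ms a) (Ms b) ≠ 0 then
        (G a).foldl (fun adj i => (G b).foldl
          (fun adj j => if i ≠ j then pvSet1 (pvSet1 adj i j) j i else adj) adj) adj
      else adj) adj) n ∧
    pvGet (bs.foldl (fun adj b => if PySem.Int.band (Ms a) (Ms b) ≠ 0 then
        (G a).foldl (fun adj i => (G b).foldl
          (fun adj j => if i ≠ j then pvSet1 (pvSet1 adj i j) j i else adj) adj) adj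
      else adj) adj) p q =
      if ∃ b ∈ bs, PySem.Int.band (Ms a) (Ms b) ≠ 0 ∧
          ∃ i ∈ G a, ∃ j ∈ G b, i ≠ j ∧ ((p = i ∧ q = j) ∨ (p = j ∧ q = i)) then 1
      else pvGet adj p q := by
  intro bs
  induction bs with
  | nil => intro adj h; exact ⟨h, by simp⟩
  | cons b bs ih =>
    intro adj h
    simp only [List.foldl_cons]
    by_cases hc : PySem.Int.band (Ms a) (Ms b) ≠ 0
    · rw [if_pos hc]
      obtain ⟨hS1, hG1⟩ := pvB_i n p q (G b) (hG b) (G a) (hG a) adj h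
      obtain ⟨hS, hGr⟩ := ih _ hS1
      refine ⟨hS, ?_⟩
      rw [hGr, hG1]
      by_cases hE : ∃ x ∈ bs, PySem.Int.band (Ms a) (Ms x) ≠ 0 ∧
          ∃ i ∈ G a, ∃ j ∈ G x, i ≠ j ∧ ((p = i ∧ q = j) ∨ (p = j ∧ q = i))
      · rw [if_pos hE, if_pos (by obtain ⟨x, h1, h2⟩ := hE; exact ⟨x, by simp [h1], h2⟩)]
      · rw [if_neg hE]
        by_cases hI : ∃ i ∈ G a, ∃ j ∈ G b, i ≠ j ∧ ((p = i ∧ q = j) ∨ (p = j ∧ q = i))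
        · rw [if_pos hI, if_pos ⟨b, by simp, hc, hI⟩]
        · rw [if_neg hI, if_neg (by
            rintro ⟨x, hx, hcx, hpx⟩
            rcases List.mem_cons.mp hx with rfl | hx'
            · exact hI hpx
            · exact hE ⟨x, hx', hcx, hpx⟩)]
    · rw [if_neg hc]
      obtain ⟨hS, hGr⟩ := ih _ h
      refine ⟨hS, ?_⟩
      rw [hGr]
      by_cases hE : ∃ x ∈ bs, PySem.Int.band (Ms a) (Ms x) ≠ 0 ∧
          ∃ i ∈ G a, ∃ j ∈ G x, i ≠ j ∧ ((p = i ∧ q = j) ∨ (p = j ∧ q = i))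
      · rw [if_pos hE, if_pos (by obtain ⟨x, h1, h2⟩ := hE; exact ⟨x, by simp [h1], h2⟩)]
      · rw [if_neg hE, if_neg (by
          rintro ⟨x, hx, hcx, hpx⟩
          rcases List.mem_cons.mp hx with rfl | hx'
          · exact hc hcx
          · exact hE ⟨x, hx', hcx, hpx⟩)]

lemma pvB_a (n m : Nat) (Ms : Nat → Int) (G : Nat → List Nat)
    (hG : ∀ x, ∀ k ∈ G x, k < n) (p q : Nat) :
    ∀ (as : List Nat), ∀ (adj : List (List Int)), pvShape adj n →
    pvShape (as.foldl (fun adj a => (List.range' a (m - a)).foldl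
        (fun adj b => if PySem.Int.band (Ms a) (Ms b) ≠ 0 then
          (G a).foldl (fun adj i => (G b).foldl
            (fun adj j => if i ≠ j then pvSet1 (pvSet1 adj i j) j i else adj) adj) adj
        else adj) adj) adj) n ∧
    pvGet (as.foldl (fun adj a => (List.range' a (m - a)).foldl
        (fun adj b => if PySem.Int.band (Ms a) (Ms b) ≠ 0 then
          (G a).foldl (fun adj i => (G b).foldl
            (fun adj j => if i ≠ j then pvSet1 (pvSet1 adj i j) j i else adj) adj) adj
        else adj) adj) adj) p q =
      if ∃ a ∈ as, ∃ b ∈ List.range' a (m - a), PySem.Int.band (Ms a) (Ms b) ≠ 0 ∧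
          ∃ i ∈ G a, ∃ j ∈ G b, i ≠ j ∧ ((p = i ∧ q = j) ∨ (p = j ∧ q = i)) then 1
      else pvGet adj p q := by
  intro as
  induction as with
  | nil => intro adj h; exact ⟨h, by simp⟩
  | cons a as ih =>
    intro adj h
    simp only [List.foldl_cons]
    obtain ⟨hS1, hG1⟩ := pvB_b n Ms G hG a p q (List.range' a (m - a)) adj h
    obtain ⟨hS, hGr⟩ := ih _ hS1
    refine ⟨hS, ?_⟩
    rw [hGr, hG1]
    by_cases hE : ∃ x ∈ as, ∃ b ∈ List.range' x (m - x), PySem.Int.band (Ms x) (Ms b) ≠ 0 ∧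
        ∃ i ∈ G x, ∃ j ∈ G b, i ≠ j ∧ ((p = i ∧ q = j) ∨ (p = j ∧ q = i))
    · rw [if_pos hE, if_pos (by obtain ⟨x, h1, h2⟩ := hE; exact ⟨x, by simp [h1], h2⟩)]
    · rw [if_neg hE]
      by_cases hA : ∃ b ∈ List.range' a (m - a), PySem.Int.band (Ms a) (Ms b) ≠ 0 ∧
          ∃ i ∈ G a, ∃ j ∈ G b, i ≠ j ∧ ((p = i ∧ q = j) ∨ (p = j ∧ q = i))
      · rw [if_pos hA, if_pos ⟨a, by simp, hA⟩]
      · rw [if_neg hA, if_neg (by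
          rintro ⟨x, hx, hpx⟩
          rcases List.mem_cons.mp hx with rfl | hx'
          · exact hA hpx
          · exact hE ⟨x, hx', hpx⟩)]

lemma pvB_cond_iff (cycles : List (List Int)) (p q : Nat)
    (hp : p < cycles.length) (hq : q < cycles.length) :
    (∃ a ∈ List.range (pvGroups cycles).keys.length,
      ∃ b ∈ List.range' a ((pvGroups cycles).keys.length - a),
      PySem.Int.band ((pvGroups cycles).keys.getD a 0) ((pvGroups cycles).keys.getD b 0) ≠ 0 ∧
      ∃ i ∈ pvGrpN cycles ((pvGroups cycles).keys.getD a 0),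
      ∃ j ∈ pvGrpN cycles ((pvGroups cycles).keys.getD b 0),
      i ≠ j ∧ ((p = i ∧ q = j) ∨ (p = j ∧ q = i)))
    ↔ (p ≠ q ∧ PySem.Int.band (pvHd cycles p) (pvHd cycles q) ≠ 0) := by
  constructor
  · rintro ⟨a, _, b, _, hband, i, hiG, j, hjG, hij, hpm⟩
    obtain ⟨hiN, hiH⟩ := (pvMem_grpN cycles _ i).mp hiG
    obtain ⟨hjN, hjH⟩ := (pvMem_grpN cycles _ j).mp hjG
    rcases hpm with ⟨rfl, rfl⟩ | ⟨rfl, rfl⟩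
    · exact ⟨hij, by rw [hiH, hjH]; exact hband⟩
    · exact ⟨fun hc => hij hc.symm, by rw [hiH, hjH, PySem.Int.band_comm]; exact hband⟩
  · rintro ⟨hpq, hband⟩
    have hpM : pvHd cycles p ∈ (pvGroups cycles).keys :=
      (pvMem_masks cycles _).mpr ⟨p, hp, rfl⟩
    have hqM : pvHd cycles q ∈ (pvGroups cycles).keys :=
      (pvMem_masks cycles _).mpr ⟨q, hq, rfl⟩
    obtain ⟨a0, ha0, hva⟩ := List.mem_iff_getElem.mp hpM
    obtain ⟨b0, hb0, hvb⟩ := List.mem_iff_getElem.mp hqM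
    have hDa : (pvGroups cycles).keys.getD a0 0 = pvHd cycles p := by
      rw [pvMasks_getD cycles a0 ha0, hva]
    have hDb : (pvGroups cycles).keys.getD b0 0 = pvHd cycles q := by
      rw [pvMasks_getD cycles b0 hb0, hvb]
    rcases Nat.lt_or_ge b0 a0 with hab | hab
    · refine ⟨b0, List.mem_range.mpr hb0, a0, ?_, ?_, q, ?_, p, ?_,
        fun hc => hpq hc.symm, Or.inr ⟨rfl, rfl⟩⟩
      · rw [List.mem_range'_1]; omega
      · rw [hDa, hDb, PySem.Int.band_comm]; exact hband
      · exact (pvMem_grpN cycles _ q).mpr ⟨hq, hDb.symm⟩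
      · exact (pvMem_grpN cycles _ p).mpr ⟨hp, hDa.symm⟩
    · refine ⟨a0, List.mem_range.mpr ha0, b0, ?_, ?_, p, ?_, q, ?_, hpq, Or.inl ⟨rfl, rfl⟩⟩
      · rw [List.mem_range'_1]; omega
      · rw [hDa, hDb]; exact hband
      · exact (pvMem_grpN cycles _ p).mpr ⟨hp, hDa.symm⟩
      · exact (pvMem_grpN cycles _ q).mpr ⟨hq, hDb.symm⟩

lemma pvB_eq_M (cycles : List (List Int)) : omega_adjacency_alt cycles = pvM cycles := by
  have hrw : omega_adjacency_alt cycles =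
      (List.range (pvGroups cycles).keys.length).foldl (fun adj a =>
        (List.range' a ((pvGroups cycles).keys.length - a)).foldl (fun adj b =>
          if PySem.Int.band ((pvGroups cycles).keys.getD a 0)
              ((pvGroups cycles).keys.getD b 0) ≠ 0 then
            (pvGrpN cycles ((pvGroups cycles).keys.getD a 0)).foldl (fun adj i =>
              (pvGrpN cycles ((pvGroups cycles).keys.getD b 0)).foldl
                (fun adj j => if i ≠ j then pvSet1 (pvSet1 adj i j) j i else adj) adj) adj
          else adj) adj)
        (List.replicate cycles.length (List.replicate cycles.length 0)) := by
    simp only [omega_adjacency_alt, pvGrp_eq, List.foldl_map, Int.toNat_natCast, ne_eq,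
      Nat.cast_inj]
  have hinit : pvShape (List.replicate cycles.length (List.replicate cycles.length (0:Int)))
      cycles.length := ⟨by simp, fun r hr => by rw [List.eq_of_mem_replicate hr]; simp⟩
  have hGbound : ∀ x : Nat, ∀ k ∈ pvGrpN cycles ((pvGroups cycles).keys.getD x 0),
      k < cycles.length := fun x k hk => ((pvMem_grpN cycles _ k).mp hk).1
  have hmain := fun p q => pvB_a cycles.length (pvGroups cycles).keys.length
    (fun x => (pvGroups cycles).keys.getD x 0)
    (fun x => pvGrpN cycles ((pvGroups cycles).keys.getD x 0)) hGbound p q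
    (List.range (pvGroups cycles).keys.length) _ hinit
  have hS : pvShape (omega_adjacency_alt cycles) cycles.length := by
    rw [hrw]; exact (hmain 0 0).1
  have hGet : ∀ p q, pvGet (omega_adjacency_alt cycles) p q =
      if ∃ a ∈ List.range (pvGroups cycles).keys.length,
          ∃ b ∈ List.range' a ((pvGroups cycles).keys.length - a),
          PySem.Int.band ((pvGroups cycles).keys.getD a 0)
            ((pvGroups cycles).keys.getD b 0) ≠ 0 ∧
          ∃ i ∈ pvGrpN cycles ((pvGroups cycles).keys.getD a 0),
          ∃ j ∈ pvGrpN cycles ((pvGroups cycles).keys.getD b 0),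
          i ≠ j ∧ ((p = i ∧ q = j) ∨ (p = j ∧ q = i)) then 1 else 0 := by
    intro p q
    rw [hrw, (hmain p q).2, pvGet_init]
  apply List.ext_getElem
  · rw [hS.1]; simp [pvM]
  · intro p hp hp2
    have hpn : p < cycles.length := by rw [← hS.1]; exact hp
    apply List.ext_getElem
    · rw [hS.2 _ (List.getElem_mem hp)]
      simp [pvM]
    · intro q hq hq2
      have hqn : q < cycles.length := by
        rw [hS.2 _ (List.getElem_mem hp)] at hq; exact hq
      have hL : (omega_adjacency_alt cycles)[p][q] = pvGet (omega_adjacency_alt cycles) p q := by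
        rw [pvGet, List.getElem?_eq_getElem hp, Option.getD_some, List.getD_eq_getElem?_getD,
          List.getElem?_eq_getElem hq, Option.getD_some]
      rw [hL, hGet]
      have hR : (pvM cycles)[p][q]'hq2 =
          if p ≠ q ∧ PySem.Int.band (pvHd cycles p) (pvHd cycles q) ≠ 0 then 1 else 0 := by
        simp [pvM]
      rw [hR]
      by_cases hpq : p ≠ q ∧ PySem.Int.band (pvHd cycles p) (pvHd cycles q) ≠ 0
      · rw [if_pos hpq, if_pos ((pvB_cond_iff cycles p q hpn hqn).mpr hpq)]
      · rw [if_neg hpq, if_neg (fun hE => hpq ((pvB_cond_iff cycles p q hpn hqn).mp hE))]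

-- ===== VERDICT (by name: the statement is the Claim_ definition above) =====
theorem omega_adjacency_spec : Claim_equal_omega_adjacency := by
  intro cycles _ _
  unfold Spec_omega_adjacency
  rw [pvA_eq_M cycles, pvB_eq_M cycles]
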